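-- pv_equiv track=rewrite | github.com/Bhavishrg/Ruffle | cryptenLocal/SwiftMPC/ouputCommitments.py | performBitwiseXOR
-- ===== SOURCE A (Python) =====
-- import math
--
-- def performBitwiseXOR(vala, valb, valc):
--     valres = 0
--     cur = 1
--     for i in range(0, 64):
--         bita = int(vala%2)
--         bitb = int(valb%2)
--         bitc = int(valc%2)
--         valres = valres + cur*(bita^bitb^bitc)
--         cur = cur*2
--         vala = math.floor(vala/2)
--         valb = math.floor(valb/2)
--         valc = math.floor(valc/2)
--
--     return valres
-- ===== SOURCE B (Python) =====
-- import math
--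
-- def performBitwiseXOR(vala, valb, valc):
--     # closed form: XOR of the two's-complement values, truncated to 64 bits
--     return (vala ^ valb ^ valc) % (1 << 64)
-- ===== Notes on version B (the rewrite author's own statement) =====
-- stated objective: simpler
-- what changed: Replaces the 64-iteration bit-extraction loop with the closed form (vala ^ valb ^ valc) % 2**64 using Python's native integer XOR.
import Mathlib
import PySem

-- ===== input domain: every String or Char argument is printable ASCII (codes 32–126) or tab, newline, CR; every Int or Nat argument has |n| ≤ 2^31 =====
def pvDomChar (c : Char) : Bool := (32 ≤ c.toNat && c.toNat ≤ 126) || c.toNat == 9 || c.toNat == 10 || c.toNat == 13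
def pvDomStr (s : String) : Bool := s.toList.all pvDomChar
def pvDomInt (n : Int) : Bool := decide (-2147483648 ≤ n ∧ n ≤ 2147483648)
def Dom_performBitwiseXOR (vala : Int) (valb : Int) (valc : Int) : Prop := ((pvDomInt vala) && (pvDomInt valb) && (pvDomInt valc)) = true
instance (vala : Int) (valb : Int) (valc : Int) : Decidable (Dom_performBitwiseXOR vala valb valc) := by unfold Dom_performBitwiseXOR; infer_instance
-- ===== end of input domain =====

-- B replaces A's 64-iteration bit-extraction loop with the closed form (a ^ b ^ c) % 2^64 (simpler).

-- ===== PORT A =====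
-- loop body of A; `math.floor(v/2)` on integer v equals floor division, ported as PySem.Int.floordiv
-- (exact for the ints in Dom; Python's float `/` is exact there).
def pvStepA (s : Int × Int × Int × Int × Int) : Int × Int × Int × Int × Int :=
  let (valres, cur, vala, valb, valc) := s
  let bita := PySem.Int.mod vala 2
  let bitb := PySem.Int.mod valb 2
  let bitc := PySem.Int.mod valc 2
  (valres + cur * (Int.xor (Int.xor bita bitb) bitc), cur * 2,
   PySem.Int.floordiv vala 2, PySem.Int.floordiv valb 2, PySem.Int.floordiv valc 2)

def performBitwiseXOR (vala : Int) (valb : Int) (valc : Int) : Int :=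
  ((PySem.List.pyRange 0 64 1).foldl (fun s _ => pvStepA s) (0, 1, vala, valb, valc)).1

-- ===== PORT B =====
def performBitwiseXOR_alt (vala : Int) (valb : Int) (valc : Int) : Int :=
  PySem.Int.mod (Int.xor (Int.xor vala valb) valc) ((1:Int) <<< (64:Int))

-- ===== PRECONDITION & SPEC =====
def Spec_performBitwiseXOR (vala : Int) (valb : Int) (valc : Int) (out : Int) : Prop := out = performBitwiseXOR_alt vala valb valc
instance (vala : Int) (valb : Int) (valc : Int) (out : Int) : Decidable (Spec_performBitwiseXOR vala valb valc out) := by unfold Spec_performBitwiseXOR; infer_instance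

-- ===== CLAIM (what is proved, stated in full; the proofs are below) =====
def Claim_equal_performBitwiseXOR : Prop := ∀ (vala : Int) (valb : Int) (valc : Int), Dom_performBitwiseXOR vala valb valc → Spec_performBitwiseXOR vala valb valc (performBitwiseXOR vala valb valc)

-- ===== LEMMAS AND PROOFS =====

theorem pv_foldl_const {α β : Type} (g : α → α) (l : List β) (s : α) :
    l.foldl (fun s _ => g s) s = g^[l.length] s := by
  induction l generalizing s with
  | nil => rfl
  | cons x xs ih => simp [List.foldl, Function.iterate_succ_apply, ih]

theorem pv_emod_two (a : Int) : a % 2 = cond a.bodd 1 0 := by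
  have h := Int.bodd_add_div2 a
  cases hb : a.bodd <;> rw [hb] at h <;> simp at h ⊢ <;> omega

theorem pv_mod_two (a : Int) : PySem.Int.mod a 2 = cond a.bodd 1 0 := by
  rw [PySem.Int.mod_eq_emod_of_pos (by norm_num), pv_emod_two]

theorem pv_floordiv_two (a : Int) : PySem.Int.floordiv a 2 = a.div2 := by
  rw [PySem.Int.floordiv_eq_ediv_of_pos (by norm_num)]
  have h := Int.bodd_add_div2 a
  cases hb : a.bodd <;> rw [hb] at h <;> simp at h <;> omega

theorem pv_xor3_bit (a b c : Int) :
    Int.xor (Int.xor a b) c =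
      Int.bit (xor (xor a.bodd b.bodd) c.bodd) (Int.xor (Int.xor a.div2 b.div2) c.div2) := by
  conv_lhs => rw [← Int.bit_decomp a, ← Int.bit_decomp b, ← Int.bit_decomp c]
  rw [Int.lxor_bit, Int.lxor_bit]

theorem pv_bit_emod (B : Bool) (M : Int) (n : Nat) :
    (Int.bit B M) % (2 ^ (n + 1)) = cond B 1 0 + 2 * (M % (2 ^ n)) := by
  have hbit : Int.bit B M = cond B 1 0 + 2 * M := by
    cases B <;> simp [Int.bit_val, Int.add_comm]
  have hk : (0:Int) < 2 ^ n := by positivity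
  have h1 : M % (2 ^ n) ≥ 0 := Int.emod_nonneg _ (by positivity)
  have h2 : M % (2 ^ n) < 2 ^ n := Int.emod_lt_of_pos _ hk
  have hM : 2 ^ n * (M / (2 ^ n)) + M % (2 ^ n) = M := Int.mul_ediv_add_emod M (2 ^ n)
  have hp : (2:Int) ^ (n + 1) = 2 * 2 ^ n := by ring
  have hdecomp : cond B 1 0 + 2 * M =
      (cond B 1 0 + 2 * (M % (2 ^ n))) + (2 ^ (n+1)) * (M / (2 ^ n)) := by
    rw [hp]; cases B <;> simp <;> nlinarith [hM]
  rw [hbit, hdecomp, Int.add_mul_emod_self_left, Int.emod_eq_of_lt]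
  · cases B <;> simp <;> omega
  · rw [hp]; cases B <;> simp <;> omega

-- cond-xor of 0/1 integers equals Int-xor of the corresponding 0/1 literals
theorem pv_cond_xor (x y z : Bool) :
    Int.xor (Int.xor (cond x 1 0) (cond y 1 0)) (cond z 1 0) = cond (xor (xor x y) z) 1 0 := by
  cases x <;> cases y <;> cases z <;> decide

-- loop invariant: n iterations of A's body add cur * ((a^b^c) mod 2^n) to valres
theorem pv_iterA (n : Nat) : ∀ (res cur a b c : Int),
    (pvStepA^[n] (res, cur, a, b, c)).1 = res + cur * ((Int.xor (Int.xor a b) c) % (2 ^ n)) := by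
  induction n with
  | zero => intro res cur a b c; simp
  | succ n ih =>
    intro res cur a b c
    rw [Function.iterate_succ_apply]
    show (pvStepA^[n] (pvStepA (res, cur, a, b, c))).1 = _
    rw [show pvStepA (res, cur, a, b, c) =
        (res + cur * (Int.xor (Int.xor (PySem.Int.mod a 2) (PySem.Int.mod b 2)) (PySem.Int.mod c 2)), cur * 2,
         PySem.Int.floordiv a 2, PySem.Int.floordiv b 2, PySem.Int.floordiv c 2) from rfl]
    rw [ih]
    rw [pv_mod_two, pv_mod_two, pv_mod_two, pv_cond_xor,
        pv_floordiv_two, pv_floordiv_two, pv_floordiv_two,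
        pv_xor3_bit a b c, pv_bit_emod]
    ring

-- ===== VERDICT (by name: the statement is the Claim_ definition above) =====
theorem performBitwiseXOR_spec : Claim_equal_performBitwiseXOR := by
  intro vala valb valc _
  show performBitwiseXOR vala valb valc = performBitwiseXOR_alt vala valb valc
  unfold performBitwiseXOR performBitwiseXOR_alt
  rw [pv_foldl_const, show (PySem.List.pyRange 0 64 1).length = 64 from rfl, pv_iterA,
      PySem.Int.mod_eq_emod_of_pos (by decide),
      show ((1:Int) <<< (64:Int)) = (2:Int) ^ (64:Nat) from rfl]
  ring
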